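-- pv_equiv track=rewrite | github.com/chipmuenk/pyfda | pyfda/libs/pyfda_fix_lib.py | bin2oct
-- ===== SOURCE A (Python) =====
-- def bin2oct(bin_str: str, WI=0) -> str:
--     """
--     Convert number `bin_str` in binary format to octal formatted string.
--     `bin_str` is prepended / appended with zeros until the number of bits before
--     and after the radix point (position given by `WI`) is a multiple of 3.
--     """
--
--     wmap = {
--         '000': '0',
--         '001': '1',
--         '010': '2',
--         '011': '3',
--         '100': '4',
--         '101': '5',
--         '110': '6',
--         '111': '7',
--         }
--
--     oct_str = ""
--
--     # --- integer part ----------------------------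
--     if WI > 0:
--         # slice string with integer bits and prepend with zeros to obtain a
--         # multiple of 3 length:
--         bin_i_str = bin_str[:WI+1]
--         while (len(bin_i_str) % 3 != 0):
--             bin_i_str = "0" + bin_i_str
--
--         i = 0
--         while (i < len(bin_i_str)):  # map chunks of 3 binary bits to one oct digit
--             oct_str = oct_str + wmap[bin_i_str[i:i + 3]]
--             i = i + 3
--     else:
--         oct_str = bin_str[0]  # copy MSB as sign bit
--
--     # --- fractional part -------------------------
--     WF = len(bin_str) - WI - 1
--     # slice string with fractional bits and append with zeros to obtain a
--     # multiple of 3 length: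
--     if WF > 0:
--         oct_str = oct_str + '.'
--         bin_f_str = bin_str[WI+1:]
--
--         while (len(bin_f_str) % 3 != 0):
--             bin_f_str = bin_f_str + "0"
--
--         # map chunks of 3 binary bits to one octal digit
--         i = 0
--         while (i < len(bin_f_str)):
--             oct_str = oct_str + wmap[bin_f_str[i:i + 3]]
--             i = i + 3
--
--     # oct_str = oct_str.lstrip("0") # remove leading zeros
--     oct_str = "0" if len(oct_str) == 0 else oct_str
--     return oct_str
-- ===== SOURCE B (Python) =====
-- def bin2oct(bin_str: str, WI=0) -> str:
--     """Convert binary string to octal: value-level conversion via int(seg, 2) and a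
--     zero-padded octal format, instead of chunk-by-chunk dict mapping."""
--     if WI > 0:
--         seg = bin_str[:WI + 1]
--         seg = "0" * ((3 - len(seg) % 3) % 3) + seg
--         oct_str = format(int(seg, 2), '0{}o'.format(len(seg) // 3)) if seg else ""
--     else:
--         oct_str = bin_str[0]  # copy MSB as sign bit
--     if len(bin_str) - WI - 1 > 0:
--         seg = bin_str[WI + 1:]
--         seg = seg + "0" * ((3 - len(seg) % 3) % 3)
--         oct_str = oct_str + '.' + format(int(seg, 2), '0{}o'.format(len(seg) // 3))
--     return oct_str if oct_str else "0"
-- ===== Notes on version B (the rewrite author's own statement) =====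
-- stated objective: idiomatic
-- what changed: Each padded bit segment is converted numerically in one shot -- parsed as a base-2 integer and printed with a fixed-width zero-padded octal format -- replacing A's while-loop that maps 3-bit chunks through a hand-written dict, and the padding is computed arithmetically instead of A's one-zero-at-a-time while loops.
import Mathlib
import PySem

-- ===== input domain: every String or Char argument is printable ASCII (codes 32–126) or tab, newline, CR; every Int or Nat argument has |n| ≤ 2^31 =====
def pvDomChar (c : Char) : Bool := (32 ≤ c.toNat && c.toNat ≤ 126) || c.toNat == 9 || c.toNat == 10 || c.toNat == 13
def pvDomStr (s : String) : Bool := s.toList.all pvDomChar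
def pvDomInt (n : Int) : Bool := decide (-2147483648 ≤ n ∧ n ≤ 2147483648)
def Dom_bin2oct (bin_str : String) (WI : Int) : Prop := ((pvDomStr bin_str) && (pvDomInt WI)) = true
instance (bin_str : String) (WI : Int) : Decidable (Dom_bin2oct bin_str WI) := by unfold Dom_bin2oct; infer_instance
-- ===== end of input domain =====

-- B converts each padded bit segment at the value level (int(seg,2) + zero-padded octal
-- format) instead of A's 3-bit-chunk dict-mapping loop; objective: idiomatic, same cost.

-- ===== PORT A =====
-- termination measures of A's while loops (cited by the ports' decreasing_by)
lemma padI3_measure (s : List Char) (h : s.length % 3 ≠ 0) :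
    (3 - ('0' :: s).length % 3) % 3 < (3 - s.length % 3) % 3 := by
  simp only [List.length_cons]; omega

lemma padF3_measure (s : List Char) (h : s.length % 3 ≠ 0) :
    (3 - (s ++ ['0']).length % 3) % 3 < (3 - s.length % 3) % 3 := by
  simp only [List.length_append, List.length_cons, List.length_nil]; omega

lemma chunkLoopA_measure (n i : Nat) (h : i < n) : n - (i + 3) < n - i := by omega

-- Python's wmap dict, as a PySem.Dict over the code-point lists of the 3-bit keys
def wmapA : PySem.Dict (List Char) (List Char) :=
  ((((((((PySem.Dict.empty.insert ['0','0','0'] ['0']).insert ['0','0','1'] ['1']).insert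
    ['0','1','0'] ['2']).insert ['0','1','1'] ['3']).insert ['1','0','0'] ['4']).insert
    ['1','0','1'] ['5']).insert ['1','1','0'] ['6']).insert ['1','1','1'] ['7'])

-- wmap[key]: the KeyError case (= none) is excluded by Pre_, so a default is safe
def wmapGet (key : List Char) : List Char := (wmapA.get? key).getD []

-- 'while len(bin_i_str) % 3 != 0: bin_i_str = "0" + bin_i_str'
def padI3 (s : List Char) : List Char :=
  if s.length % 3 ≠ 0 then padI3 ('0' :: s) else s
termination_by (3 - s.length % 3) % 3
decreasing_by rename_i h; exact padI3_measure s h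

-- 'while len(bin_f_str) % 3 != 0: bin_f_str = bin_f_str + "0"'
def padF3 (s : List Char) : List Char :=
  if s.length % 3 ≠ 0 then padF3 (s ++ ['0']) else s
termination_by (3 - s.length % 3) % 3
decreasing_by rename_i h; exact padF3_measure s h

-- 'i = 0; while i < len(b): oct_str = oct_str + wmap[b[i:i+3]]; i = i + 3'
def chunkLoopA (l : List Char) (i : Nat) (oct : List Char) : List Char :=
  if i < l.length then
    chunkLoopA l (i + 3) (oct ++ wmapGet (PySem.List.slice l (some (i : Int)) (some ((i : Int) + 3))))
  else oct
termination_by l.length - i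
decreasing_by rename_i h; exact chunkLoopA_measure l.length i h

def bin2octCore (l : List Char) (WI : Int) : List Char :=
  let oct0 : List Char :=
    if WI > 0 then
      chunkLoopA (padI3 (PySem.List.slice l none (some (WI + 1)))) 0 []
    else
      [PySem.List.pyGetD l 0 ' ']   -- bin_str[0]; IndexError excluded by Pre_
  let WF : Int := (l.length : Int) - WI - 1
  let oct1 : List Char :=
    if WF > 0 then
      chunkLoopA (padF3 (PySem.List.slice l (some (WI + 1)) none)) 0 (oct0 ++ ['.'])
    else oct0
  if oct1.length = 0 then ['0'] else oct1

def bin2oct (bin_str : String) (WI : Int) : String :=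
  String.ofList (bin2octCore bin_str.toList WI)

-- ===== PORT B =====
-- port of int(seg, 2) on a segment of binary digit characters (exact on Pre_'s domain)
def binValNat (l : List Char) : Nat :=
  l.foldl (fun a c => 2 * a + (if c = '1' then 1 else 0)) 0

-- port of format(n, ...o) with width k: k octal digits, zero-padded, built back to front
def octFmt : Nat → Nat → List Char
  | 0, _ => []
  | k + 1, n => octFmt k (n / 8) ++ [Char.ofNat (48 + n % 8)]

def bin2octAltCore (l : List Char) (WI : Int) : List Char :=
  let oct0 : List Char :=
    if WI > 0 then
      let seg := PySem.List.slice l none (some (WI + 1))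
      let seg := List.replicate ((3 - seg.length % 3) % 3) '0' ++ seg
      if seg = [] then [] else octFmt (seg.length / 3) (binValNat seg)
    else
      [PySem.List.pyGetD l 0 ' ']   -- bin_str[0]; IndexError excluded by Pre_
  let oct1 : List Char :=
    if (l.length : Int) - WI - 1 > 0 then
      let seg := PySem.List.slice l (some (WI + 1)) none
      let seg := seg ++ List.replicate ((3 - seg.length % 3) % 3) '0'
      oct0 ++ '.' :: octFmt (seg.length / 3) (binValNat seg)
    else oct0
  if oct1 = [] then ['0'] else oct1

def bin2oct_alt (bin_str : String) (WI : Int) : String :=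
  String.ofList (bin2octAltCore bin_str.toList WI)

-- ===== PRECONDITION & SPEC =====
def binCh (c : Char) : Bool := c == '0' || c == '1'

-- Pre_ excludes exactly the inputs where A raises: a KeyError when a chunk-mapped slice
-- holds a non-binary character, and an IndexError on bin_str[0] for WI <= 0 with empty
-- bin_str.
def Pre_bin2oct (bin_str : String) (WI : Int) : Prop :=
  (if WI > 0 then (PySem.List.slice bin_str.toList none (some (WI + 1))).all binCh = true
   else bin_str.toList ≠ []) ∧
  ((bin_str.toList.length : Int) - WI - 1 > 0 →
    (PySem.List.slice bin_str.toList (some (WI + 1)) none).all binCh = true)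
instance (bin_str : String) (WI : Int) : Decidable (Pre_bin2oct bin_str WI) := by
  unfold Pre_bin2oct; infer_instance

def pvWitness_bin2oct : String × Int := ("110101", 3)

def Spec_bin2oct (bin_str : String) (WI : Int) (out : String) : Prop := out = bin2oct_alt bin_str WI
instance (bin_str : String) (WI : Int) (out : String) : Decidable (Spec_bin2oct bin_str WI out) := by
  unfold Spec_bin2oct; infer_instance

-- ===== CLAIM (what is proved, stated in full; the proofs are below) =====
def Claim_equal_bin2oct : Prop := ∀ (bin_str : String) (WI : Int), Dom_bin2oct bin_str WI → Pre_bin2oct bin_str WI → Spec_bin2oct bin_str WI (bin2oct bin_str WI)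

-- ===== LEMMAS AND PROOFS =====

lemma padI3_eq (s : List Char) :
    padI3 s = List.replicate ((3 - s.length % 3) % 3) '0' ++ s := by
  fun_induction padI3 s with
  | case1 s h ih =>
    rw [ih]
    have h1 : (3 - ('0'::s).length % 3) % 3 + 1 = (3 - s.length % 3) % 3 := by
      simp only [List.length_cons]; omega
    rw [← h1, List.replicate_succ', List.append_assoc]
    simp
  | case2 s h => simp at h; simp [h]

lemma padF3_eq (s : List Char) :
    padF3 s = s ++ List.replicate ((3 - s.length % 3) % 3) '0' := by
  fun_induction padF3 s with
  | case1 s h ih =>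
    rw [ih, List.append_assoc]
    have h1 : (3 - (s ++ ['0']).length % 3) % 3 + 1 = (3 - s.length % 3) % 3 := by
      simp only [List.length_append, List.length_cons, List.length_nil]; omega
    rw [← h1, List.replicate_succ]
    simp
  | case2 s h => simp at h; simp [h]

lemma binValNat_aux (l : List Char) (a : Nat) :
    l.foldl (fun a c => 2 * a + (if c = '1' then 1 else 0)) a
      = a * 2 ^ l.length + binValNat l := by
  induction l generalizing a with
  | nil => simp [binValNat]
  | cons c t ih =>
    simp only [List.foldl_cons, List.length_cons]
    rw [ih]
    have hb : binValNat (c :: t) = (if c = '1' then 1 else 0) * 2 ^ t.length + binValNat t := by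
      unfold binValNat
      simp only [List.foldl_cons]
      rw [ih]
      norm_num [binValNat]
    rw [hb]
    ring

lemma binValNat_append (xs ys : List Char) :
    binValNat (xs ++ ys) = binValNat xs * 2 ^ ys.length + binValNat ys := by
  unfold binValNat
  rw [List.foldl_append]
  exact binValNat_aux ys _

lemma binValNat_lt (l : List Char) : binValNat l < 2 ^ l.length := by
  induction l with
  | nil => simp [binValNat]
  | cons c t ih =>
    have := binValNat_aux t (2 * 0 + (if c = '1' then 1 else 0))
    unfold binValNat
    simp only [List.foldl_cons, List.length_cons]
    rw [this]
    have h2 : (if c = '1' then 1 else 0) ≤ 1 := by split <;> omega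
    have h3 : 2 ^ (t.length + 1) = 2 * 2 ^ t.length := by ring
    rw [h3]
    nlinarith [ih]

lemma octFmt_front (k : Nat) : ∀ d r : Nat, d < 8 → r < 8 ^ k →
    octFmt (k + 1) (d * 8 ^ k + r) = Char.ofNat (48 + d) :: octFmt k r := by
  induction k with
  | zero =>
    intro d r hd hr
    interval_cases r
    simp [octFmt, Nat.mod_eq_of_lt hd]
  | succ k ih =>
    intro d r hd hr
    have hdiv : (d * 8 ^ (k + 1) + r) / 8 = d * 8 ^ k + r / 8 := by
      have h : d * 8 ^ (k + 1) = 8 * (d * 8 ^ k) := by ring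
      rw [h, Nat.mul_add_div (by omega)]
    have hmod : (d * 8 ^ (k + 1) + r) % 8 = r % 8 := by
      have h : d * 8 ^ (k + 1) = d * 8 ^ k * 8 := by ring
      rw [h, Nat.add_comm, Nat.add_mul_mod_self_right]
    have hr8 : r / 8 < 8 ^ k := by
      rw [Nat.div_lt_iff_lt_mul (by omega)]
      calc r < 8 ^ (k+1) := hr
        _ = 8 ^ k * 8 := by ring
    show octFmt (k + 1 + 1) _ = _
    rw [octFmt, hdiv, hmod, ih d (r / 8) hd hr8]
    rfl

-- A's chunk loop, restated structurally: consume 3 chars at a time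
lemma chunkGo_measure (l : List Char) (h : l ≠ []) : (l.drop 3).length < l.length := by
  have hl : 0 < l.length := List.length_pos_iff.mpr h
  rw [List.length_drop]; omega

def chunkGo (l : List Char) : List Char :=
  if l = [] then [] else wmapGet (l.take 3) ++ chunkGo (l.drop 3)
termination_by l.length
decreasing_by rename_i h; exact chunkGo_measure l h

lemma chunkLoopA_eq (l : List Char) (i : Nat) (oct : List Char) :
    chunkLoopA l i oct = oct ++ chunkGo (l.drop i) := by
  fun_induction chunkLoopA l i oct with
  | case1 i oct h ih =>
    rw [ih]
    have hslice : PySem.List.slice l (some (i : Int)) (some ((i : Int) + 3))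
        = (l.drop i).take 3 := by
      have := PySem.List.slice_natCast_add (xs := l) (j := i) (n := 3)
      simpa using this
    have hne : l.drop i ≠ [] := by
      intro hc
      have := congrArg List.length hc
      simp [List.length_drop] at this
      omega
    conv_rhs => rw [chunkGo]
    rw [if_neg hne, List.drop_drop, hslice]
    simp
  | case2 i oct h =>
    have h0 : l.drop i = [] := List.drop_eq_nil_of_le (by omega)
    simp [h0, chunkGo]

lemma chunkGo_eq (k : Nat) : ∀ l : List Char, l.length = 3 * k →
    l.all binCh = true → chunkGo l = octFmt k (binValNat l) := by
  induction k with
  | zero =>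
    intro l hl _
    have h0 : l = [] := List.eq_nil_of_length_eq_zero (by omega)
    subst h0
    simp [chunkGo, octFmt]
  | succ k ih =>
    intro l hl hb
    match l, hl with
    | a :: b :: c :: rest, hl =>
      have hrest : rest.length = 3 * k := by simp at hl; omega
      simp only [List.all_cons, Bool.and_eq_true] at hb
      obtain ⟨ha', hb', hc', hrb⟩ := hb
      have hsplit : binValNat (a :: b :: c :: rest)
          = binValNat [a, b, c] * 2 ^ rest.length + binValNat rest := by
        have := binValNat_append [a, b, c] rest
        simpa using this
      have hpow : (2 : Nat) ^ rest.length = 8 ^ k := by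
        rw [hrest]; rw [pow_mul]; norm_num
      have hdlt : binValNat [a, b, c] < 8 := by
        have := binValNat_lt [a, b, c]; simpa using this
      have hrlt : binValNat rest < 8 ^ k := by
        have := binValNat_lt rest; rwa [hrest, pow_mul] at this
      rw [chunkGo]
      simp only [List.take, List.drop]
      rw [ih rest hrest hrb, hsplit, hpow,
        octFmt_front k (binValNat [a, b, c]) (binValNat rest) hdlt hrlt]
      have hw : wmapGet [a, b, c] = [Char.ofNat (48 + binValNat [a, b, c])] := by
        unfold binCh at ha' hb' hc'
        rcases Bool.or_eq_true_iff.mp ha' with h | h <;>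
        rcases Bool.or_eq_true_iff.mp hb' with h2 | h2 <;>
        rcases Bool.or_eq_true_iff.mp hc' with h3 | h3 <;>
          simp only [beq_iff_eq] at h h2 h3 <;> subst h h2 h3 <;> decide
      rw [hw]
      rfl

-- A's chunk loop on a binary segment, once padded to a multiple of 3, IS B's
-- "parse then zero-padded octal format"
lemma chunk_pad (t : List Char) (h3 : t.length % 3 = 0) (hb : t.all binCh = true) :
    chunkGo t = octFmt (t.length / 3) (binValNat t) :=
  chunkGo_eq (t.length / 3) t (by omega) hb

lemma all_binCh_pad_left (s : List Char) (n : Nat) (hb : s.all binCh = true) :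
    (List.replicate n '0' ++ s).all binCh = true := by
  simp [List.all_append, hb]
  right; decide

lemma all_binCh_pad_right (s : List Char) (n : Nat) (hb : s.all binCh = true) :
    (s ++ List.replicate n '0').all binCh = true := by
  simp [List.all_append, hb]
  right; decide

lemma core_eq (l : List Char) (WI : Int)
    (h1 : if WI > 0 then (PySem.List.slice l none (some (WI + 1))).all binCh = true
          else l ≠ [])
    (h2 : (l.length : Int) - WI - 1 > 0 →
          (PySem.List.slice l (some (WI + 1)) none).all binCh = true) :
    bin2octCore l WI = bin2octAltCore l WI := by
  unfold bin2octCore bin2octAltCore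
  have hoct0 :
      (if WI > 0 then chunkLoopA (padI3 (PySem.List.slice l none (some (WI + 1)))) 0 []
       else [PySem.List.pyGetD l 0 ' '])
      = (if WI > 0 then
          (if List.replicate ((3 - (PySem.List.slice l none (some (WI + 1))).length % 3) % 3) '0'
              ++ PySem.List.slice l none (some (WI + 1)) = [] then []
           else octFmt ((List.replicate ((3 - (PySem.List.slice l none (some (WI + 1))).length % 3) % 3) '0'
              ++ PySem.List.slice l none (some (WI + 1))).length / 3)
             (binValNat (List.replicate ((3 - (PySem.List.slice l none (some (WI + 1))).length % 3) % 3) '0'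
              ++ PySem.List.slice l none (some (WI + 1)))))
         else [PySem.List.pyGetD l 0 ' ']) := by
    by_cases hWI : WI > 0
    · simp only [if_pos hWI]
      rw [if_pos hWI] at h1
      set s := PySem.List.slice l none (some (WI + 1)) with hs
      set sp := List.replicate ((3 - s.length % 3) % 3) '0' ++ s with hsp
      have hlen : sp.length % 3 = 0 := by
        rw [hsp]; simp only [List.length_append, List.length_replicate]; omega
      rw [padI3_eq, chunkLoopA_eq, List.drop_zero, List.nil_append, ← hsp]
      by_cases hnil : sp = []
      · rw [if_pos hnil, hnil, chunkGo]; simp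
      · rw [if_neg hnil]
        exact chunk_pad sp hlen (all_binCh_pad_left s _ h1)
    · simp only [if_neg hWI]
  rw [hoct0]
  set oct0 : List Char := (if WI > 0 then _ else _)
  by_cases hWF : (l.length : Int) - WI - 1 > 0
  · simp only [if_pos hWF]
    set s := PySem.List.slice l (some (WI + 1)) none with hs
    set sp := s ++ List.replicate ((3 - s.length % 3) % 3) '0' with hsp
    have hlen : sp.length % 3 = 0 := by
      rw [hsp]; simp only [List.length_append, List.length_replicate]; omega
    rw [padF3_eq, chunkLoopA_eq, List.drop_zero, ← hsp,
      chunk_pad sp hlen (all_binCh_pad_right s _ (h2 hWF))]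
    have hform : oct0 ++ ['.'] ++ octFmt (sp.length / 3) (binValNat sp)
        = oct0 ++ '.' :: octFmt (sp.length / 3) (binValNat sp) := by
      simp
    rw [hform]
    have hne : oct0 ++ '.' :: octFmt (sp.length / 3) (binValNat sp) ≠ [] := by simp
    rw [if_neg (fun hc => hne (List.length_eq_zero_iff.mp hc)), if_neg hne]
  · simp only [if_neg hWF]
    by_cases hnil : oct0 = []
    · rw [hnil]; simp
    · rw [if_neg (by simpa [List.length_eq_zero_iff] using hnil), if_neg hnil]

-- ===== VERDICT (by name: the statement is the Claim_ definition above) =====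
theorem bin2oct_spec : Claim_equal_bin2oct := by
  intro bin_str WI _ hpre
  obtain ⟨h1, h2⟩ := hpre
  unfold Spec_bin2oct bin2oct bin2oct_alt
  rw [core_eq bin_str.toList WI h1 h2]
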